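-- pv_equiv track=rewrite | github.com/chipuha/OzMachine_python | ui_tools.py | log_wrapping
-- ===== SOURCE A (Python) =====
-- def log_wrapping(log, maximum):
--     polygons = []
--     lines = []
--
--     above_max = []
--     middle = []
--     below_zero = []
--     y = 0
--     for x, y in log:
--         if x < 0:
--             below_zero.append((x, y))
--             if middle:  # make sure a has something in it
--                 middle.append((0, y))
--                 lines.append(middle)
--             if above_max:  # make sure a has something in it
--                 above_max_t = [(x - maximum, y) for x, y in above_max]
--                 above_max_t.insert(0, (0, above_max_t[0][1]))
--                 above_max_t.append((0, above_max_t[-1][1]))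
--                 polygons.append(above_max_t)
--             middle = []
--             above_max = []
--         elif x > maximum:
--             above_max.append((x, y))
--             if middle:  # make sure a has something in it
--                 middle.append((maximum, y))
--                 lines.append(middle)
--             if below_zero:  # make sure a has something in it
--                 below_zero_t = [(x + maximum, y) for x, y in below_zero]
--                 below_zero_t.insert(0, (maximum, below_zero_t[0][1]))
--                 below_zero_t.append((maximum, below_zero_t[-1][1]))
--                 polygons.append(below_zero_t)
--             middle = []
--             below_zero = []
--         else:
--             if above_max:  # make sure a has something in it
--                 middle.append((maximum, y))
--                 above_max_t = [(x - maximum, y) for x, y in above_max]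
--                 above_max_t.insert(0, (0, above_max_t[0][1]))
--                 above_max_t.append((0, above_max_t[-1][1]))
--                 polygons.append(above_max_t)
--             if below_zero:  # make sure a has something in it
--                 middle.append((0, y))
--                 below_zero_t = [(x + maximum, y) for x, y in below_zero]
--                 below_zero_t.insert(0, (maximum, below_zero_t[0][1]))
--                 below_zero_t.append((maximum, below_zero_t[-1][1]))
--                 polygons.append(below_zero_t)
--             middle.append((x, y))
--             below_zero = []
--             above_max = []
--
--     if middle:  # make sure a has something in it
--         if len(middle) < 2:
--             middle.append((middle[0][0], y))
--         lines.append(middle)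
--     if above_max:  # make sure a has something in it
--         above_max_t = [(x - maximum, y) for x, y in above_max]
--         above_max_t.insert(0, (0, above_max_t[0][1]))
--         above_max_t.append((0, above_max_t[-1][1]))
--         polygons.append(above_max_t)
--     if below_zero:  # make sure a has something in it
--         below_zero_t = [(x + maximum, y) for x, y in below_zero]
--         below_zero_t.insert(0, (maximum, below_zero_t[0][1]))
--         below_zero_t.append((maximum, below_zero_t[-1][1]))
--         polygons.append(below_zero_t)
--
--     return lines, polygons
-- ===== SOURCE B (Python) =====
-- # B: two independent passes over maximal same-zone runs (itertools.groupby):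
-- # polygons are simply every out-of-range run closed, in run order; lines are the
-- # middle runs decorated from their neighbouring runs -- no per-point state machine.
-- from itertools import groupby
--
--
-- def log_wrapping(log, maximum):
--     def zone(p):
--         return -1 if p[0] < 0 else (1 if p[0] > maximum else 0)
--
--     def close(r, dx, cx):
--         t = [(x + dx, y) for x, y in r]
--         return [(cx, t[0][1])] + t + [(cx, t[-1][1])]
--
--     runs = [(z, list(g)) for z, g in groupby(log, key=zone)]
--
--     polygons = [close(r, -maximum, 0) if z == 1 else close(r, maximum, maximum)
--                 for z, r in runs if z != 0]
--
--     lines = []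
--     for i, (z, r) in enumerate(runs):
--         if z != 0:
--             continue
--         seg = [] if i == 0 else [((maximum if runs[i - 1][0] == 1 else 0), r[0][1])]
--         seg += r
--         if i + 1 < len(runs):
--             nz, nr = runs[i + 1]
--             seg.append(((0 if nz == -1 else maximum), nr[0][1]))
--         elif len(seg) < 2:
--             seg.append((seg[0][0], log[-1][1]))
--         lines.append(seg)
--
--     return lines, polygons
-- ===== Notes on version B (the rewrite author's own statement) =====
-- stated objective: alternative
-- what changed: Replaces A's per-point three-branch state machine with two independent passes over the maximal same-zone runs obtained from itertools.groupby: polygons are simply every out-of-range run closed in run order, and lines are the middle runs decorated with boundary caps computed from their neighbouring runs.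
import Mathlib
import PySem

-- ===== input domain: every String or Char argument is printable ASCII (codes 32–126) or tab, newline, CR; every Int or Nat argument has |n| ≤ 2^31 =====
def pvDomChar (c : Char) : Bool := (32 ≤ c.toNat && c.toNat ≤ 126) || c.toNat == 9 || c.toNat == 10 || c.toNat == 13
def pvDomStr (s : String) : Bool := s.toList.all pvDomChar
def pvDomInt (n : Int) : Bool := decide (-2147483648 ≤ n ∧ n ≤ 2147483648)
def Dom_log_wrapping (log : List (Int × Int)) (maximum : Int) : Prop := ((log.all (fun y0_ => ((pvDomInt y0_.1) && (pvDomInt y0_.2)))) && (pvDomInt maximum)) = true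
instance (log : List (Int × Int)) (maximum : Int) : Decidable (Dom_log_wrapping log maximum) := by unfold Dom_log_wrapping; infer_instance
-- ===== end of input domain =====

-- B replaces A's per-point three-branch state machine by two independent passes over the
-- maximal same-zone runs (itertools.groupby): polygons = every out-of-range run closed, in
-- run order; lines = the middle runs decorated from their neighbouring runs ("alternative").

-- ===== PORT A =====
-- A's local variables (above_max, middle, below_zero, lines, polygons, loop's y)
structure WState where
  above : List (Int × Int)
  middle : List (Int × Int)
  below : List (Int × Int)
  lines : List (List (Int × Int))
  polys : List (List (Int × Int))
  y : Int
deriving Repr, DecidableEq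

-- A's thrice-repeated polygon-closing blocks:
-- t = shifted copy; insert (0|maximum, t[0][1]) in front, append (0|maximum, t[-1][1]).
def closeAbove (m : Int) (l : List (Int × Int)) : List (Int × Int) :=
  let t := l.map (fun p => (p.1 - m, p.2))
  match t, t.getLast? with
  | h :: _, some lst => ((0 : Int), h.2) :: t ++ [((0 : Int), lst.2)]
  | _, _ => []

def closeBelow (m : Int) (l : List (Int × Int)) : List (Int × Int) :=
  let t := l.map (fun p => (p.1 + m, p.2))
  match t, t.getLast? with
  | h :: _, some lst => (m, h.2) :: t ++ [(m, lst.2)]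
  | _, _ => []

-- one iteration of A's for-loop, branch for branch
def stepA (m : Int) (s : WState) (p : Int × Int) : WState :=
  let x := p.1
  let y := p.2
  if x < 0 then
    let below := s.below ++ [(x, y)]
    let lines := if s.middle.isEmpty then s.lines else s.lines ++ [s.middle ++ [((0 : Int), y)]]
    let polys := if s.above.isEmpty then s.polys else s.polys ++ [closeAbove m s.above]
    ⟨[], [], below, lines, polys, y⟩
  else if x > m then
    let above := s.above ++ [(x, y)]
    let lines := if s.middle.isEmpty then s.lines else s.lines ++ [s.middle ++ [(m, y)]]
    let polys := if s.below.isEmpty then s.polys else s.polys ++ [closeBelow m s.below]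
    ⟨above, [], [], lines, polys, y⟩
  else
    let mp : List (Int × Int) × List (List (Int × Int)) :=
      if s.above.isEmpty then (s.middle, s.polys)
      else (s.middle ++ [(m, y)], s.polys ++ [closeAbove m s.above])
    let mp2 : List (Int × Int) × List (List (Int × Int)) :=
      if s.below.isEmpty then mp
      else (mp.1 ++ [((0 : Int), y)], mp.2 ++ [closeBelow m s.below])
    ⟨[], mp2.1 ++ [(x, y)], [], s.lines, mp2.2, y⟩

-- A's code after the loop
def tailA (m : Int) (s : WState) : (List (List (Int × Int))) × (List (List (Int × Int))) :=
  let middle := if s.middle ≠ [] ∧ s.middle.length < 2 then s.middle ++ [(s.middle.headI.1, s.y)] else s.middle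
  let lines := if s.middle.isEmpty then s.lines else s.lines ++ [middle]
  let polys := if s.above.isEmpty then s.polys else s.polys ++ [closeAbove m s.above]
  let polys := if s.below.isEmpty then polys else polys ++ [closeBelow m s.below]
  (lines, polys)

def log_wrapping (log : List (Int × Int)) (maximum : Int) : (List (List (Int × Int))) × (List (List (Int × Int))) :=
  tailA maximum (log.foldl (stepA maximum) ⟨[], [], [], [], [], 0⟩)

-- ===== PORT B =====
def zoneB (m x : Int) : Int := if x < 0 then -1 else if x > m then 1 else 0

-- Source B's generic close(r, dx, cx)
def closeB (dx cx : Int) (r : List (Int × Int)) : List (Int × Int) :=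
  let t := r.map (fun p => (p.1 + dx, p.2))
  (cx, t.headI.2) :: t ++ [(cx, (t.getLast?.getD (0, 0)).2)]

-- itertools.groupby(log, key=zone): maximal runs of consecutive same-zone points, with zone
def groupRunsZ (m : Int) : List (Int × Int) → List (Int × List (Int × Int))
  | [] => []
  | p :: t =>
    (zoneB m p.1, p :: t.takeWhile (fun q => zoneB m q.1 == zoneB m p.1)) ::
      groupRunsZ m (t.dropWhile (fun q => zoneB m q.1 == zoneB m p.1))
  termination_by l => l.length
  decreasing_by
    simp only [List.length_cons]
    exact Nat.lt_succ_of_le (List.length_dropWhile_le _ _)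

-- Source B's polygons comprehension: each out-of-range run, closed, in run order
def polysB (m : Int) (runs : List (Int × List (Int × Int))) : List (List (Int × Int)) :=
  (runs.filter (fun zr => zr.1 != 0)).map
    (fun zr => if zr.1 == 1 then closeB (-m) 0 zr.2 else closeB m m zr.2)

-- Source B's lines loop: middle runs decorated from the previous / next run
def linesB (m lasty : Int) : Option Int → List (Int × List (Int × Int)) → List (List (Int × Int))
  | _, [] => []
  | prev, (z, r) :: rest =>
    if z = 0 then
      let hd : List (Int × Int) :=
        match prev with
        | none => []
        | some pz => [((if pz == 1 then m else 0), r.headI.2)]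
      let seg := hd ++ r
      let seg2 :=
        match rest with
        | (nz, nr) :: _ => seg ++ [((if nz == -1 then (0 : Int) else m), nr.headI.2)]
        | [] => if seg.length < 2 then seg ++ [(seg.headI.1, lasty)] else seg
      seg2 :: linesB m lasty (some z) rest
    else linesB m lasty (some z) rest

def log_wrapping_alt (log : List (Int × Int)) (maximum : Int) : (List (List (Int × Int))) × (List (List (Int × Int))) :=
  let runs := groupRunsZ maximum log
  (linesB maximum ((log.getLast?.getD (0, 0)).2) none runs, polysB maximum runs)

-- ===== PRECONDITION & SPEC =====
def Spec_log_wrapping (log : List (Int × Int)) (maximum : Int) (out : (List (List (Int × Int))) × (List (List (Int × Int)))) : Prop := out = log_wrapping_alt log maximum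
instance (log : List (Int × Int)) (maximum : Int) (out : (List (List (Int × Int))) × (List (List (Int × Int)))) : Decidable (Spec_log_wrapping log maximum out) := by unfold Spec_log_wrapping; infer_instance

-- ===== CLAIM =====
def Claim_equal_log_wrapping : Prop := ∀ (log : List (Int × Int)) (maximum : Int), Dom_log_wrapping log maximum → Spec_log_wrapping log maximum (log_wrapping log maximum)

-- ===== LEMMAS AND PROOFS =====

theorem zone_neg {m x : Int} (h : zoneB m x = -1) : x < 0 := by
  unfold zoneB at h; split_ifs at h; omega

theorem zone_pos {m x : Int} (h : zoneB m x = 1) : ¬ x < 0 ∧ x > m := by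
  unfold zoneB at h; split_ifs at h <;> omega

theorem zone_mid {m x : Int} (h : ¬ zoneB m x = -1) (h2 : ¬ zoneB m x = 1) : ¬ x < 0 ∧ ¬ x > m := by
  unfold zoneB at h h2; split_ifs at h h2 <;> omega

theorem zone_cases (m x : Int) : zoneB m x = -1 ∨ zoneB m x = 1 ∨ zoneB m x = 0 := by
  unfold zoneB; split_ifs <;> simp

def lastY (l : List (Int × Int)) (y : Int) : Int :=
  match l.getLast? with
  | some p => p.2
  | none => y

theorem lastY_cons (p : Int × Int) (l : List (Int × Int)) (y : Int) :
    lastY (p :: l) y = lastY l p.2 := by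
  cases l with
  | nil => simp [lastY]
  | cons q t =>
    unfold lastY
    rw [List.getLast?_cons_cons]
    cases h : (q :: t).getLast? with
    | none => simp at h
    | some v => rfl

theorem lastY_append (u v : List (Int × Int)) (y : Int) :
    lastY (u ++ v) y = lastY v (lastY u y) := by
  induction u generalizing y with
  | nil => simp [lastY]
  | cons a t ih => rw [List.cons_append, lastY_cons, ih, lastY_cons]

-- proof-side per-run state machine: one stepR on a whole zone-annotated run
def stepR (m : Int) (s : WState) (zr : Int × List (Int × Int)) : WState :=
  let z := zr.1
  let run := zr.2
  let y1 := run.headI.2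
  let ly := lastY run s.y
  if z = -1 then
    ⟨[], [], run,
      (if s.middle.isEmpty then s.lines else s.lines ++ [s.middle ++ [((0 : Int), y1)]]),
      (if s.above.isEmpty then s.polys else s.polys ++ [closeAbove m s.above]), ly⟩
  else if z = 1 then
    ⟨run, [], [],
      (if s.middle.isEmpty then s.lines else s.lines ++ [s.middle ++ [(m, y1)]]),
      (if s.below.isEmpty then s.polys else s.polys ++ [closeBelow m s.below]), ly⟩
  else
    let hp : List (Int × Int) × List (List (Int × Int)) :=
      if s.above.isEmpty then ([], s.polys) else ([(m, y1)], s.polys ++ [closeAbove m s.above])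
    let hp2 : List (Int × Int) × List (List (Int × Int)) :=
      if s.below.isEmpty then hp else ([((0 : Int), y1)], hp.2 ++ [closeBelow m s.below])
    ⟨[], s.middle ++ hp2.1 ++ run, [], s.lines, hp2.2, ly⟩

-- entering a run of zone z, A's matching buffer must be empty
def EntryOk (z : Int) (s : WState) : Prop :=
  if z = -1 then s.below = []
  else if z = 1 then s.above = []
  else s.middle = [] ∧ (s.above = [] ∨ s.below = [])

def headZoneOk (m : Int) (log : List (Int × Int)) (s : WState) : Prop :=
  match log with
  | [] => True
  | p :: _ => EntryOk (zoneB m p.1) s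

theorem cont_below (m : Int) : ∀ (l : List (Int × Int)) (bel : List (Int × Int))
    (li po : List (List (Int × Int))) (y0 : Int),
    (∀ q ∈ l, zoneB m q.1 = -1) →
    l.foldl (stepA m) ⟨[], [], bel, li, po, y0⟩ = ⟨[], [], bel ++ l, li, po, lastY l y0⟩ := by
  intro l
  induction l with
  | nil => intro bel li po y0 _; simp [lastY]
  | cons q t ih =>
    intro bel li po y0 h
    have hq : q.1 < 0 := zone_neg (h q (by simp))
    have hst : stepA m ⟨[], [], bel, li, po, y0⟩ q = ⟨[], [], bel ++ [q], li, po, q.2⟩ := by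
      simp [stepA, hq]
    rw [List.foldl_cons, hst, ih _ _ _ _ (fun r hr => h r (by simp [hr])), lastY_cons]
    simp

theorem cont_above (m : Int) : ∀ (l : List (Int × Int)) (ab : List (Int × Int))
    (li po : List (List (Int × Int))) (y0 : Int),
    (∀ q ∈ l, zoneB m q.1 = 1) →
    l.foldl (stepA m) ⟨ab, [], [], li, po, y0⟩ = ⟨ab ++ l, [], [], li, po, lastY l y0⟩ := by
  intro l
  induction l with
  | nil => intro ab li po y0 _; simp [lastY]
  | cons q t ih =>
    intro ab li po y0 h
    obtain ⟨h1, h2⟩ := zone_pos (h q (by simp))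
    have hst : stepA m ⟨ab, [], [], li, po, y0⟩ q = ⟨ab ++ [q], [], [], li, po, q.2⟩ := by
      simp [stepA, h1, h2]
    rw [List.foldl_cons, hst, ih _ _ _ _ (fun r hr => h r (by simp [hr])), lastY_cons]
    simp

theorem cont_middle (m : Int) : ∀ (l : List (Int × Int)) (mid : List (Int × Int))
    (li po : List (List (Int × Int))) (y0 : Int),
    (∀ q ∈ l, zoneB m q.1 = 0) →
    l.foldl (stepA m) ⟨[], mid, [], li, po, y0⟩ = ⟨[], mid ++ l, [], li, po, lastY l y0⟩ := by
  intro l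
  induction l with
  | nil => intro mid li po y0 _; simp [lastY]
  | cons q t ih =>
    intro mid li po y0 h
    have hz := h q (by simp)
    obtain ⟨h1, h2⟩ := zone_mid (m := m) (x := q.1) (by omega) (by omega)
    have hst : stepA m ⟨[], mid, [], li, po, y0⟩ q = ⟨[], mid ++ [q], [], li, po, q.2⟩ := by
      simp [stepA, h1, h2]
    rw [List.foldl_cons, hst, ih _ _ _ _ (fun r hr => h r (by simp [hr])), lastY_cons]
    simp

-- processing one full run with A's per-point step equals one per-run stepR
theorem run_eq (m : Int) (p : Int × Int) (r : List (Int × Int)) (s : WState)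
    (hr : ∀ q ∈ r, zoneB m q.1 = zoneB m p.1)
    (he : EntryOk (zoneB m p.1) s) :
    (p :: r).foldl (stepA m) s = stepR m s (zoneB m p.1, p :: r) := by
  rcases s with ⟨ab, mid, bel, li, po, y0⟩
  rw [List.foldl_cons]
  rcases zone_cases m p.1 with hz | hz | hz
  · have hx := zone_neg hz
    have hbel : bel = [] := by simpa [EntryOk, hz] using he
    subst hbel
    have hst : stepA m ⟨ab, mid, [], li, po, y0⟩ p =
        ⟨[], [], [p],
          (if mid.isEmpty then li else li ++ [mid ++ [((0 : Int), p.2)]]),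
          (if ab.isEmpty then po else po ++ [closeAbove m ab]), p.2⟩ := by
      simp [stepA, hx]
    rw [hst, cont_below m r [p] _ _ _ (fun q hq => (hr q hq).trans hz)]
    simp [stepR, hz, lastY_cons]
  · obtain ⟨h1, h2⟩ := zone_pos hz
    have hab : ab = [] := by simpa [EntryOk, hz] using he
    subst hab
    have hst : stepA m ⟨[], mid, bel, li, po, y0⟩ p =
        ⟨[p], [], [],
          (if mid.isEmpty then li else li ++ [mid ++ [(m, p.2)]]),
          (if bel.isEmpty then po else po ++ [closeBelow m bel]), p.2⟩ := by
      simp [stepA, h1, h2]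
    rw [hst, cont_above m r [p] _ _ _ (fun q hq => (hr q hq).trans hz)]
    simp [stepR, hz, lastY_cons]
  · obtain ⟨h1, h2⟩ := zone_mid (m := m) (x := p.1) (by omega) (by omega)
    have he' : mid = [] ∧ (ab = [] ∨ bel = []) := by simpa [EntryOk, hz] using he
    obtain ⟨hmid, hor⟩ := he'
    subst hmid
    have hst : stepA m ⟨ab, [], bel, li, po, y0⟩ p =
        ⟨[], (if ab.isEmpty then ([] : List (Int × Int)) else [(m, p.2)]) ++
             (if bel.isEmpty then ([] : List (Int × Int)) else [((0 : Int), p.2)]) ++ [p], [],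
          li,
          (if bel.isEmpty then (if ab.isEmpty then po else po ++ [closeAbove m ab])
           else (if ab.isEmpty then po else po ++ [closeAbove m ab]) ++ [closeBelow m bel]),
          p.2⟩ := by
      by_cases hb : bel = [] <;> by_cases ha : ab = [] <;> simp_all [stepA] <;>
        split_ifs <;> first | rfl | omega
    rw [hst, cont_middle m r _ _ _ _ (fun q hq => (hr q hq).trans hz)]
    rcases hor with h | h <;> by_cases hb : bel = [] <;> by_cases ha : ab = [] <;>
      simp_all [stepR, lastY_cons]

theorem dropWhile_head_false {α : Type} (pred : α → Bool) :
    ∀ (l : List α) (q : α) (rest : List α), l.dropWhile pred = q :: rest → pred q = false := by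
  intro l
  induction l with
  | nil => intro q rest h; simp [List.dropWhile] at h
  | cons a t ih =>
    intro q rest h
    rw [List.dropWhile_cons] at h
    by_cases hp : pred a
    · simp [hp] at h; exact ih q rest h
    · simp [hp] at h; rw [← h.1]; simpa using hp

theorem stepR_fields_neg (m : Int) (run : List (Int × Int)) (s : WState) :
    (stepR m s (-1, run)).above = [] ∧ (stepR m s (-1, run)).middle = [] := by
  simp [stepR]

theorem stepR_fields_pos (m : Int) (run : List (Int × Int)) (s : WState) :
    (stepR m s (1, run)).middle = [] ∧ (stepR m s (1, run)).below = [] := by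
  simp [stepR]

theorem stepR_fields_mid (m : Int) (run : List (Int × Int)) (s : WState) :
    (stepR m s (0, run)).above = [] ∧ (stepR m s (0, run)).below = [] := by
  simp [stepR]

-- after a run of one zone, the entry invariant holds for any different zone
theorem entry_after (m : Int) (z : Int) (run : List (Int × Int)) (s : WState)
    (hz0 : z = -1 ∨ z = 1 ∨ z = 0)
    (z' : Int) (hz3 : z' = -1 ∨ z' = 1 ∨ z' = 0) (hz' : z' ≠ z) :
    EntryOk z' (stepR m s (z, run)) := by
  unfold EntryOk
  rcases hz0 with hz | hz | hz <;> subst hz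
  · obtain ⟨ha, hm⟩ := stepR_fields_neg m run s
    rcases hz3 with h3 | h3 | h3 <;> subst h3
    · exact absurd rfl hz'
    · norm_num [ha]
    · norm_num [ha, hm]
  · obtain ⟨hm, hb⟩ := stepR_fields_pos m run s
    rcases hz3 with h3 | h3 | h3 <;> subst h3
    · norm_num [hb]
    · exact absurd rfl hz'
    · norm_num [hm, hb]
  · obtain ⟨ha, hb⟩ := stepR_fields_mid m run s
    rcases hz3 with h3 | h3 | h3 <;> subst h3
    · norm_num [hb]
    · norm_num [ha]
    · exact absurd rfl hz'

-- A's per-point fold equals the per-run stepR fold over the groupby runs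
theorem fold_eq (m : Int) : ∀ (n : Nat) (log : List (Int × Int)) (s : WState),
    log.length ≤ n → headZoneOk m log s →
    log.foldl (stepA m) s = (groupRunsZ m log).foldl (stepR m) s := by
  intro n
  induction n with
  | zero =>
    intro log s hlen _
    have : log = [] := List.eq_nil_of_length_eq_zero (Nat.le_zero.mp hlen)
    subst this; simp [groupRunsZ]
  | succ k ih =>
    intro log s hlen he
    cases log with
    | nil => simp [groupRunsZ]
    | cons p t =>
      have hrw : groupRunsZ m (p :: t) =
          (zoneB m p.1, p :: t.takeWhile (fun q => zoneB m q.1 == zoneB m p.1)) ::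
            groupRunsZ m (t.dropWhile (fun q => zoneB m q.1 == zoneB m p.1)) := by
        rw [groupRunsZ]
      have hA : List.foldl (stepA m) s (p :: t)
          = List.foldl (stepA m)
              (List.foldl (stepA m) s
                (p :: t.takeWhile (fun q => zoneB m q.1 == zoneB m p.1)))
              (t.dropWhile (fun q => zoneB m q.1 == zoneB m p.1)) := by
        conv_lhs => rw [show (p :: t) =
          (p :: t.takeWhile (fun q => zoneB m q.1 == zoneB m p.1)) ++
            t.dropWhile (fun q => zoneB m q.1 == zoneB m p.1) by
          simp [List.takeWhile_append_dropWhile]]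
        rw [List.foldl_append]
      have hr : ∀ q ∈ t.takeWhile (fun q => zoneB m q.1 == zoneB m p.1),
          zoneB m q.1 = zoneB m p.1 := by
        intro q hq
        simpa using List.mem_takeWhile_imp hq
      rw [hA, hrw, run_eq m p _ s hr (by simpa [headZoneOk] using he), List.foldl_cons]
      apply ih
      · have h1 := List.length_dropWhile_le (fun q => zoneB m q.1 == zoneB m p.1) t
        have h2 : (p :: t).length ≤ k + 1 := hlen
        simp at h2
        omega
      · cases hdw : t.dropWhile (fun q => zoneB m q.1 == zoneB m p.1) with
        | nil => simp [headZoneOk]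
        | cons q rest =>
          have hne : zoneB m q.1 ≠ zoneB m p.1 := by
            simpa using dropWhile_head_false _ t q rest hdw
          exact entry_after m (zoneB m p.1) _ s (zone_cases m p.1)
            (zoneB m q.1) (zone_cases m q.1) hne

-- validity of the run decomposition: runs nonempty, zone-labelled, adjacent zones differ
def ValidChain (m : Int) : Option Int → List (Int × List (Int × Int)) → Prop
  | _, [] => True
  | prevz, (z, r) :: rest =>
      r ≠ [] ∧ (z = -1 ∨ z = 1 ∨ z = 0) ∧ (∀ q ∈ r, zoneB m q.1 = z) ∧
        prevz ≠ some z ∧ ValidChain m (some z) rest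

theorem groupRunsZ_valid (m : Int) : ∀ (n : Nat) (log : List (Int × Int)) (prevz : Option Int),
    log.length ≤ n →
    (match log with | [] => True | p :: _ => prevz ≠ some (zoneB m p.1)) →
    ValidChain m prevz (groupRunsZ m log) := by
  intro n
  induction n with
  | zero =>
    intro log prevz hlen _
    have : log = [] := List.eq_nil_of_length_eq_zero (Nat.le_zero.mp hlen)
    subst this; simp [groupRunsZ, ValidChain]
  | succ k ih =>
    intro log prevz hlen hh
    cases log with
    | nil => simp [groupRunsZ, ValidChain]
    | cons p t =>
      rw [groupRunsZ]
      refine ⟨by simp, zone_cases m p.1, ?_, hh, ?_⟩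
      · intro q hq
        rcases List.mem_cons.mp hq with h | h
        · subst h; rfl
        · simpa using List.mem_takeWhile_imp h
      · apply ih
        · have h1 := List.length_dropWhile_le (fun q => zoneB m q.1 == zoneB m p.1) t
          have h2 : (p :: t).length ≤ k + 1 := hlen
          simp at h2
          omega
        · cases hdw : t.dropWhile (fun q => zoneB m q.1 == zoneB m p.1) with
          | nil => trivial
          | cons q rest =>
            have hne : zoneB m q.1 ≠ zoneB m p.1 := by
              simpa using dropWhile_head_false _ t q rest hdw
            simpa using fun hc => hne hc.symm

def finalY (rs : List (Int × List (Int × Int))) (y : Int) : Int :=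
  rs.foldl (fun y zr => lastY zr.2 y) y

theorem finalY_groupRunsZ (m : Int) : ∀ (n : Nat) (log : List (Int × Int)) (y : Int),
    log.length ≤ n → finalY (groupRunsZ m log) y = lastY log y := by
  intro n
  induction n with
  | zero =>
    intro log y hlen
    have : log = [] := List.eq_nil_of_length_eq_zero (Nat.le_zero.mp hlen)
    subst this; simp [groupRunsZ, finalY, lastY]
  | succ k ih =>
    intro log y hlen
    cases log with
    | nil => simp [groupRunsZ, finalY, lastY]
    | cons p t =>
      rw [groupRunsZ]
      show finalY (groupRunsZ m (t.dropWhile _)) (lastY (p :: t.takeWhile _) y) = _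
      rw [ih]
      · rw [← lastY_append]
        congr 1
        simp [List.takeWhile_append_dropWhile]
      · have h1 := List.length_dropWhile_le (fun q => zoneB m q.1 == zoneB m p.1) t
        have h2 : (p :: t).length ≤ k + 1 := hlen
        simp at h2
        omega

-- the state shapes reachable when about to process runs whose previous zone is prevz
def CtxOk (prevz : Option Int) (ab mid bel : List (Int × Int)) : Prop :=
  match prevz with
  | none => ab = [] ∧ mid = [] ∧ bel = []
  | some z =>
      if z = 1 then ab ≠ [] ∧ mid = [] ∧ bel = []
      else if z = -1 then ab = [] ∧ mid = [] ∧ bel ≠ []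
      else z = 0 ∧ ab = [] ∧ mid ≠ [] ∧ bel = []

-- the line segment still pending for an unfinished middle buffer
def pendL (m lasty : Int) (mid : List (Int × Int)) (rs : List (Int × List (Int × Int))) :
    List (List (Int × Int)) :=
  if mid.isEmpty then []
  else
    match rs with
    | (nz, nr) :: _ => [mid ++ [((if nz == -1 then (0 : Int) else m), nr.headI.2)]]
    | [] => [if mid.length < 2 then mid ++ [(mid.headI.1, lasty)] else mid]

-- the polygon still pending for an unfinished out-of-range buffer
def pendP (m : Int) (ab bel : List (Int × Int)) : List (List (Int × Int)) :=
  if ab.isEmpty then (if bel.isEmpty then [] else [closeBelow m bel]) else [closeAbove m ab]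

theorem closeB_above (m : Int) (r : List (Int × Int)) (hr : r ≠ []) :
    closeB (-m) 0 r = closeAbove m r := by
  cases r with
  | nil => exact absurd rfl hr
  | cons p t =>
    simp only [closeB, closeAbove, List.map_cons, ← sub_eq_add_neg]
    cases h : ((p.1 - m, p.2) :: List.map (fun q => (q.1 - m, q.2)) t).getLast? with
    | none => simp at h
    | some v => simp [List.headI]

theorem closeB_below (m : Int) (r : List (Int × Int)) (hr : r ≠ []) :
    closeB m m r = closeBelow m r := by
  cases r with
  | nil => exact absurd rfl hr
  | cons p t =>
    simp only [closeB, closeBelow, List.map_cons]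
    cases h : ((p.1 + m, p.2) :: List.map (fun q => (q.1 + m, q.2)) t).getLast? with
    | none => simp at h
    | some v => simp [List.headI]

-- the head cap linesB prepends to a middle run, given the previous zone
def linesHd (m : Int) (prev : Option Int) (run : List (Int × Int)) : List (Int × Int) :=
  match prev with
  | none => []
  | some pz => [((if pz == 1 then m else 0), run.headI.2)]

theorem linesB_mid (m lasty : Int) (prev : Option Int) (run : List (Int × Int))
    (rest : List (Int × List (Int × Int))) (hrun : run ≠ []) :
    linesB m lasty prev ((0, run) :: rest) =
      pendL m lasty (linesHd m prev run ++ run) rest ++ linesB m lasty (some 0) rest := by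
  rw [linesB.eq_def, pendL.eq_def]
  cases rest with
  | nil => cases prev <;> simp [linesHd, hrun]
  | cons w ws => obtain ⟨nz, nr⟩ := w; cases prev <;> simp [linesHd, hrun]

theorem linesB_out (m lasty : Int) (prev : Option Int) (z : Int) (run : List (Int × Int))
    (rest : List (Int × List (Int × Int))) (hz : z ≠ 0) :
    linesB m lasty prev ((z, run) :: rest) = linesB m lasty (some z) rest := by
  rw [linesB.eq_def]
  simp [hz]

theorem polysB_mid (m : Int) (run : List (Int × Int)) (rest : List (Int × List (Int × Int))) :
    polysB m ((0, run) :: rest) = polysB m rest := by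
  simp [polysB]

theorem polysB_neg (m : Int) (run : List (Int × Int)) (rest : List (Int × List (Int × Int)))
    (hrun : run ≠ []) :
    polysB m ((-1, run) :: rest) = closeBelow m run :: polysB m rest := by
  simp [polysB, closeB_below m run hrun]

theorem polysB_pos (m : Int) (run : List (Int × Int)) (rest : List (Int × List (Int × Int)))
    (hrun : run ≠ []) :
    polysB m ((1, run) :: rest) = closeAbove m run :: polysB m rest := by
  simp [polysB, closeB_above m run hrun]

-- main run-list lemma: folding stepR then running A's tail equals B's two passes
theorem fold_tail (m lasty : Int) : ∀ (rs : List (Int × List (Int × Int))) (prevz : Option Int)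
    (ab mid bel : List (Int × Int)) (li po : List (List (Int × Int))) (y0 : Int),
    ValidChain m prevz rs → CtxOk prevz ab mid bel → finalY rs y0 = lasty →
    tailA m (rs.foldl (stepR m) ⟨ab, mid, bel, li, po, y0⟩) =
      (li ++ pendL m lasty mid rs ++ linesB m lasty prevz rs,
       po ++ pendP m ab bel ++ polysB m rs) := by
  intro rs
  induction rs with
  | nil =>
    intro prevz ab mid bel li po y0 _ hc hy
    have hy0 : y0 = lasty := hy
    subst hy0
    rcases prevz with _ | z
    · obtain ⟨ha, hm, hb⟩ := hc
      subst ha; subst hm; subst hb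
      simp [tailA, pendL, pendP, linesB, polysB]
    · by_cases h1 : z = 1
      · subst h1
        obtain ⟨ha, hm, hb⟩ : ab ≠ [] ∧ mid = [] ∧ bel = [] := by simpa [CtxOk] using hc
        subst hm; subst hb
        simp [tailA, pendL, pendP, linesB, polysB, ha]
      · by_cases h2 : z = -1
        · subst h2
          obtain ⟨ha, hm, hb⟩ : ab = [] ∧ mid = [] ∧ bel ≠ [] := by norm_num [CtxOk] at hc; exact hc
          subst ha; subst hm
          simp [tailA, pendL, pendP, linesB, polysB, hb]
        · obtain ⟨hz, ha, hm, hb⟩ : z = 0 ∧ ab = [] ∧ mid ≠ [] ∧ bel = [] := by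
            simp [CtxOk, h1, h2] at hc; exact hc
          subst ha; subst hb
          simp only [tailA, pendL, pendP, linesB, polysB]
          by_cases hlen : mid.length < 2 <;> simp [hm, hlen]
  | cons zr rest ih =>
    intro prevz ab mid bel li po y0 hv hc hy
    obtain ⟨z, run⟩ := zr
    obtain ⟨hrun, hz0, _, hpz, hvrest⟩ := hv
    have hyrest : finalY rest (lastY run y0) = lasty := hy
    rcases hz0 with hz | hz | hz <;> subst hz
    -- z = -1 : below run; flush middle to lines, flush pending above polygon
    · have hbel : bel = [] := by
        rcases prevz with _ | pz
        · exact hc.2.2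
        · by_cases h1 : pz = 1
          · subst h1; exact ((show ab ≠ [] ∧ mid = [] ∧ bel = [] by simpa [CtxOk] using hc)).2.2
          · by_cases h2 : pz = -1
            · exact absurd (by rw [h2]) hpz
            · exact ((show pz = 0 ∧ ab = [] ∧ mid ≠ [] ∧ bel = [] by
                simp [CtxOk, h1, h2] at hc; exact hc)).2.2.2
      subst hbel
      rw [List.foldl_cons]
      have hst : stepR m ⟨ab, mid, [], li, po, y0⟩ (-1, run) =
          ⟨[], [], run, li ++ pendL m lasty mid ((-1, run) :: rest),
            po ++ pendP m ab [], lastY run y0⟩ := by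
        simp only [stepR, pendL, pendP]
        by_cases hm : mid.isEmpty <;> by_cases ha : ab.isEmpty <;> simp [hm, ha]
      rw [hst, ih (some (-1)) [] [] run _ _ _ hvrest (by norm_num [CtxOk]; exact hrun) hyrest,
        linesB_out m lasty prevz (-1) run rest (by norm_num),
        polysB_neg m run rest hrun]
      have hre : run.isEmpty = false := by simpa using hrun
      simp [pendL, pendP, hre]
    -- z = 1 : above run; flush middle to lines, flush pending below polygon
    · have hab : ab = [] := by
        rcases prevz with _ | pz
        · exact hc.1
        · by_cases h1 : pz = 1
          · exact absurd (by rw [h1]) hpz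
          · by_cases h2 : pz = -1
            · subst h2
              exact ((show ab = [] ∧ mid = [] ∧ bel ≠ [] by
                norm_num [CtxOk] at hc; exact hc)).1
            · exact ((show pz = 0 ∧ ab = [] ∧ mid ≠ [] ∧ bel = [] by
                simp [CtxOk, h1, h2] at hc; exact hc)).2.1
      subst hab
      rw [List.foldl_cons]
      have hst : stepR m ⟨[], mid, bel, li, po, y0⟩ (1, run) =
          ⟨run, [], [], li ++ pendL m lasty mid ((1, run) :: rest),
            po ++ pendP m [] bel, lastY run y0⟩ := by
        simp only [stepR, pendL, pendP]
        by_cases hm : mid.isEmpty <;> by_cases hb : bel.isEmpty <;> simp [hm, hb]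
      rw [hst, ih (some 1) run [] [] _ _ _ hvrest (by simpa [CtxOk] using hrun) hyrest,
        linesB_out m lasty prevz 1 run rest (by norm_num),
        polysB_pos m run rest hrun]
      have hre : run.isEmpty = false := by simpa using hrun
      simp [pendL, pendP, hre]
    -- z = 0 : middle run; cap from the pending buffer, flush its polygon
    · have hmid : mid = [] := by
        rcases prevz with _ | pz
        · exact hc.2.1
        · by_cases h1 : pz = 1
          · subst h1; exact ((show ab ≠ [] ∧ mid = [] ∧ bel = [] by simpa [CtxOk] using hc)).2.1
          · by_cases h2 : pz = -1
            · subst h2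
              exact ((show ab = [] ∧ mid = [] ∧ bel ≠ [] by
                norm_num [CtxOk] at hc; exact hc)).2.1
            · exact absurd (by rw [((show pz = 0 ∧ ab = [] ∧ mid ≠ [] ∧ bel = [] by
                simp [CtxOk, h1, h2] at hc; exact hc)).1]) hpz
      subst hmid
      rw [List.foldl_cons]
      have hst : stepR m ⟨ab, [], bel, li, po, y0⟩ (0, run) =
          ⟨[], linesHd m prevz run ++ run, [], li, po ++ pendP m ab bel, lastY run y0⟩ := by
        rcases prevz with _ | pz
        · obtain ⟨ha, _, hb⟩ := hc
          subst ha; subst hb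
          simp [stepR, pendP, linesHd]
        · by_cases h1 : pz = 1
          · subst h1
            obtain ⟨ha, hb⟩ : ab ≠ [] ∧ bel = [] := by simpa [CtxOk] using hc
            subst hb
            simp [stepR, pendP, linesHd, ha]
          · by_cases h2 : pz = -1
            · subst h2
              obtain ⟨ha, hb⟩ : ab = [] ∧ bel ≠ [] := by
                norm_num [CtxOk] at hc; exact hc
              subst ha
              simp [stepR, pendP, linesHd, hb]
            · simp [CtxOk, h1, h2] at hc
      rw [hst, ih (some 0) [] (linesHd m prevz run ++ run) [] _ _ _ hvrest
        (by simp [CtxOk, hrun]) hyrest,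
        linesB_mid m lasty prevz run rest hrun, polysB_mid m run rest]
      simp [pendL, pendP]

-- ===== VERDICT (by name: the statement is the Claim_ definition above) =====
theorem log_wrapping_spec : Claim_equal_log_wrapping := by
  intro log maximum _
  unfold Spec_log_wrapping log_wrapping log_wrapping_alt
  rw [fold_eq maximum log.length log _ le_rfl (by
    cases log with
    | nil => trivial
    | cons p t =>
      simp only [headZoneOk]
      unfold EntryOk
      split_ifs <;> simp)]
  rw [fold_tail maximum ((log.getLast?.getD (0, 0)).2) (groupRunsZ maximum log) none
    [] [] [] [] [] 0
    (groupRunsZ_valid maximum log.length log none le_rfl (by cases log <;> simp))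
    ⟨rfl, rfl, rfl⟩
    (by
      rw [finalY_groupRunsZ maximum log.length log 0 le_rfl]
      unfold lastY
      cases h : log.getLast? with
      | none => simp
      | some v => simp)]
  simp [pendL, pendP]
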